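-- pv_equiv track=rewrite | github.com/bastoica/wasabi | utils/bug_oracles.py | parseCallstack
-- ===== SOURCE A (Python) =====
-- _TOP_FRAME_PATTERN = [
--     "org.apache.hadoop",
-- ]
--
-- def parseCallstack(lines: [], top: int, bottom: int):
--     lastUnitTestStackFrame = None
--     lastUnitTestName = None
--     topAppFrame = None
--
--     for index in range(top, bottom + 1):
--         if ("at " in lines[index]) and (".Test" in lines[index]) and (".test" in lines[index]):
--             if lastUnitTestStackFrame is None:
--                 lastUnitTestStackFrame = lines[index].split("at ")[1].strip()
--         for pattern in _TOP_FRAME_PATTERN: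
--             if pattern in lines[index]:
--                 topAppFrame = lines[index].strip()
--
--     if lastUnitTestStackFrame:
--         lastUnitTestName = lastUnitTestStackFrame.split("(")[0].split(".")[-1]
--
--     return lastUnitTestName, lastUnitTestStackFrame, topAppFrame
-- ===== SOURCE B (Python) =====
-- _TOP_FRAME_PATTERN = [
--     "org.apache.hadoop",
-- ]
--
-- def parseCallstack(lines: [], top: int, bottom: int):
--     idxs = range(top, bottom + 1)
--     lastUnitTestStackFrame = next(
--         (lines[i].split("at ")[1].strip()
--          for i in idxs
--          if ("at " in lines[i]) and (".Test" in lines[i]) and (".test" in lines[i])),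
--         None)
--     topAppFrame = next(
--         (lines[i].strip()
--          for i in reversed(idxs)
--          if any(p in lines[i] for p in _TOP_FRAME_PATTERN)),
--         None)
--     lastUnitTestName = (lastUnitTestStackFrame.split("(")[0].split(".")[-1]
--                         if lastUnitTestStackFrame else None)
--     return lastUnitTestName, lastUnitTestStackFrame, topAppFrame
-- ===== Notes on version B (the rewrite author's own statement) =====
-- stated objective: alternative
-- what changed: Replaces A's single combined loop carrying two pieces of mutable state with two independent short-circuiting searches: a forward next() for the first unit-test frame and a reversed next() for the last app frame.
import Mathlib
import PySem

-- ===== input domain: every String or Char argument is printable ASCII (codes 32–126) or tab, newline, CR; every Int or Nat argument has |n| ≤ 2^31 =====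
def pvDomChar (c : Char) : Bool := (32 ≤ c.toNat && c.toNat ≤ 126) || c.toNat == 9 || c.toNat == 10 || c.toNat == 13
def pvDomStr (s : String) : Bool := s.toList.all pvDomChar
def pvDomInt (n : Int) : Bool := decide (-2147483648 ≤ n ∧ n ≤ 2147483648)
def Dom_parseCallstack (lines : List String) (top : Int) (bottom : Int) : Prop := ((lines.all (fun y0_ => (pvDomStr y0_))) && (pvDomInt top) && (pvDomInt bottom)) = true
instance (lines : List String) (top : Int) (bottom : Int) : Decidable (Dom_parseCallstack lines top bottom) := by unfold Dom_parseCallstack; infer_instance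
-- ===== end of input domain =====

-- B replaces A's single combined loop (two mutable variables) with two independent
-- short-circuiting searches: a forward find for the unit-test frame and a reversed
-- find for the last app frame. Same cost, different decomposition.

-- line condition "at " in l and ".Test" in l and ".test" in l
def pvIsUT (l : String) : Bool :=
  PySem.Str.isIn "at " l && PySem.Str.isIn ".Test" l && PySem.Str.isIn ".test" l

-- lines[index].split("at ")[1].strip()  (the guard guarantees piece 1 exists)
def pvFrameOf (l : String) : String :=
  PySem.Str.strip (PySem.List.pyGetD ((PySem.Str.split? l "at ").getD []) 1 "")

-- frame.split("(")[0].split(".")[-1]  (pieces 0 and -1 always exist)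
def pvNameOf (f : String) : String :=
  PySem.List.pyGetD ((PySem.Str.split? (PySem.List.pyGetD ((PySem.Str.split? f "(").getD []) 0 "") ".").getD []) (-1) ""

-- ===== PORT A =====
def parseCallstackStep (lines : List String) (st : Option String × Option String) (i : Int) :
    Option String × Option String :=
  let line := PySem.List.pyGetD lines i ""   -- in range by Pre_
  let frame :=
    if pvIsUT line then
      match st.1 with
      | none => some (pvFrameOf line)
      | some f => some f
    else st.1
  let app := ["org.apache.hadoop"].foldl
      (fun a p => if PySem.Str.isIn p line then some (PySem.Str.strip line) else a) st.2
  (frame, app)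

def parseCallstack (lines : List String) (top : Int) (bottom : Int) :
    Option String × Option String × Option String :=
  let st := (PySem.List.pyRange top (bottom + 1) 1).foldl (parseCallstackStep lines) (none, none)
  let lastUnitTestStackFrame := st.1
  let topAppFrame := st.2
  let lastUnitTestName :=
    match lastUnitTestStackFrame with
    | none => none
    | some f => if f = "" then none else some (pvNameOf f)
  (lastUnitTestName, lastUnitTestStackFrame, topAppFrame)

-- ===== PORT B =====
def parseCallstack_alt (lines : List String) (top : Int) (bottom : Int) :
    Option String × Option String × Option String :=
  let idxs := PySem.List.pyRange top (bottom + 1) 1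
  let line := fun i => PySem.List.pyGetD lines i ""   -- in range by Pre_
  let lastUnitTestStackFrame :=
    (idxs.find? (fun i => pvIsUT (line i))).map (fun i => pvFrameOf (line i))
  let topAppFrame :=
    (idxs.reverse.find? (fun i => PySem.Str.isIn "org.apache.hadoop" (line i))).map
      (fun i => PySem.Str.strip (line i))
  let lastUnitTestName :=
    match lastUnitTestStackFrame with
    | none => none
    | some f => if f = "" then none else some (pvNameOf f)
  (lastUnitTestName, lastUnitTestStackFrame, topAppFrame)

-- ===== PRECONDITION & SPEC =====
-- Pre_ excludes exactly the inputs where Python A raises IndexError: some index in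
-- range(top, bottom+1) is out of lines' (negative-index) range.
def Pre_parseCallstack (lines : List String) (top : Int) (bottom : Int) : Prop :=
  bottom < top ∨ (PySem.Raise.InRange lines.length top ∧ PySem.Raise.InRange lines.length bottom)
instance (lines : List String) (top : Int) (bottom : Int) : Decidable (Pre_parseCallstack lines top bottom) := by unfold Pre_parseCallstack; infer_instance

def pvWitness_parseCallstack : List String × Int × Int :=
  (["  at foo.TestX.testY(X.java:3)", "  at org.apache.hadoop.Z(Z.java:1)"], 0, 1)

def Spec_parseCallstack (lines : List String) (top : Int) (bottom : Int) (out : Option String × Option String × Option String) : Prop := out = parseCallstack_alt lines top bottom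
instance (lines : List String) (top : Int) (bottom : Int) (out : Option String × Option String × Option String) : Decidable (Spec_parseCallstack lines top bottom out) := by unfold Spec_parseCallstack; infer_instance

-- ===== CLAIM (what is proved, stated in full; the proofs are below) =====
def Claim_equal_parseCallstack : Prop := ∀ (lines : List String) (top : Int) (bottom : Int), Dom_parseCallstack lines top bottom → Pre_parseCallstack lines top bottom → Spec_parseCallstack lines top bottom (parseCallstack lines top bottom)

-- ===== LEMMAS AND PROOFS =====

-- first component of A's fold = first-match search (B's forward find)
theorem pvFold_fst (lines : List String) (l : List Int) (f0 : Option String) (a0 : Option String) :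
    (l.foldl (parseCallstackStep lines) (f0, a0)).1
      = (f0.orElse fun _ =>
          (l.find? (fun i => pvIsUT (PySem.List.pyGetD lines i ""))).map
            (fun i => pvFrameOf (PySem.List.pyGetD lines i ""))) := by
  induction l generalizing f0 a0 with
  | nil => cases f0 <;> rfl
  | cons x xs ih =>
    simp only [List.foldl_cons, List.find?]
    rw [show parseCallstackStep lines (f0, a0) x =
        ((if pvIsUT (PySem.List.pyGetD lines x "") then
            match f0 with | none => some (pvFrameOf (PySem.List.pyGetD lines x "")) | some f => some f
          else f0),
         (if PySem.Str.isIn "org.apache.hadoop" (PySem.List.pyGetD lines x "") then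
            some (PySem.Str.strip (PySem.List.pyGetD lines x "")) else a0)) from rfl]
    rw [ih]
    cases f0 <;> by_cases h : pvIsUT (PySem.List.pyGetD lines x "") = true <;>
      simp [h, Option.orElse]

-- second component of A's fold = last-match = B's reversed find
theorem pvFold_snd (lines : List String) (l : List Int) (f0 : Option String) (a0 : Option String) :
    (l.foldl (parseCallstackStep lines) (f0, a0)).2
      = ((l.reverse.find? (fun i => PySem.Str.isIn "org.apache.hadoop" (PySem.List.pyGetD lines i ""))).map
          (fun i => PySem.Str.strip (PySem.List.pyGetD lines i ""))).orElse (fun _ => a0) := by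
  induction l generalizing f0 a0 with
  | nil => cases a0 <;> rfl
  | cons x xs ih =>
    simp only [List.foldl_cons, List.reverse_cons]
    rw [show parseCallstackStep lines (f0, a0) x =
        ((if pvIsUT (PySem.List.pyGetD lines x "") then
            match f0 with | none => some (pvFrameOf (PySem.List.pyGetD lines x "")) | some f => some f
          else f0),
         (if PySem.Str.isIn "org.apache.hadoop" (PySem.List.pyGetD lines x "") then
            some (PySem.Str.strip (PySem.List.pyGetD lines x "")) else a0)) from rfl]
    rw [ih, List.find?_append]
    by_cases h : PySem.Str.isIn "org.apache.hadoop" (PySem.List.pyGetD lines x "") = true <;>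
      cases hr : xs.reverse.find? (fun i => PySem.Str.isIn "org.apache.hadoop" (PySem.List.pyGetD lines i "")) <;>
      simp only [hr, h, List.find?, Option.orElse, Option.map, if_true, if_false,
        Bool.false_eq_true] <;> rfl

-- ===== VERDICT (by name: the statement is the Claim_ definition above) =====
theorem parseCallstack_spec : Claim_equal_parseCallstack := by
  intro lines top bottom _ _
  unfold Spec_parseCallstack parseCallstack parseCallstack_alt
  dsimp only
  rw [pvFold_fst, pvFold_snd]
  cases (PySem.List.pyRange top (bottom + 1) 1).reverse.find?
      (fun i => PySem.Str.isIn "org.apache.hadoop" (PySem.List.pyGetD lines i "")) <;> rfl
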